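-- pv_equiv track=rewrite | github.com/leodovqa/palworld-data-tool | iptv_work/organize_iptv.py | determine_group
-- ===== SOURCE A (Python) =====
-- from typing import Dict, List, Tuple
--
-- def determine_group(channel: Dict) -> str:
--     """Determine the appropriate group for a channel based on original group-title"""
--     original_group = channel['group'].strip()
--
--     # If we have an original group, use it
--     if original_group:
--         return original_group
--
--     # Fallback: determine group from channel name
--     name = channel['name'].lower()
--
--     # Major networks
--     if any(network in name for network in ['abc', 'cbs', 'nbc', 'pbs', 'fox']):
--         if 'abc' in name:
--             return 'USA - ABC Network'
--         elif 'cbs' in name: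
--             return 'USA - CBS Network'
--         elif 'nbc' in name:
--             return 'USA - NBC Network'
--         elif 'pbs' in name:
--             return 'USA - PBS Network'
--         elif 'fox' in name:
--             return 'USA - FOX Network'
--
--     # Sports networks
--     if any(sport in name for sport in ['espn', 'fox sports', 'tennis', 'mlb', 'nba', 'nfl', 'nhl']):
--         if 'tennis plus' in name:
--             return 'USA - Tennis Plus'
--         elif 'espn plus' in name:
--             return 'USA - ESPN+'
--         elif 'mlb' in name:
--             return 'USA - MLB'
--         elif 'nba' in name:
--             return 'USA - NBA'
--         elif 'nfl' in name:
--             return 'USA - NFL'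
--         elif 'nhl' in name:
--             return 'USA - NHL'
--         else:
--             return 'USA - Sport'
--
--     # News networks
--     if any(news in name for news in ['cnn', 'fox news', 'msnbc', 'abc news', 'cbs news']):
--         return 'USA - News'
--
--     # Premium networks
--     if any(premium in name for premium in ['hbo', 'showtime', 'cinemax', 'starz']):
--         return 'USA - Premium'
--
--     # Entertainment networks
--     if any(ent in name for ent in ['mtv', 'vh1', 'comedy central', 'tbs', 'tnt']):
--         return 'USA - Entertainment'
--
--     # Kids networks
--     if any(kids in name for kids in ['disney', 'nickelodeon', 'cartoon network', 'nick']):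
--         return 'USA - Kids'
--
--     return 'USA'
-- ===== SOURCE B (Python) =====
-- # B: flatten A's two-level cascade into ONE prioritized flat keyword table (shadowed
-- # entries like 'fox sports'/'fox news'/'msnbc' removed as unreachable), collect ALL
-- # matching indices in one comprehension, and pick the minimum-priority hit.
-- _FLAT = [
--     ('abc', 'USA - ABC Network'), ('cbs', 'USA - CBS Network'),
--     ('nbc', 'USA - NBC Network'), ('pbs', 'USA - PBS Network'),
--     ('fox', 'USA - FOX Network'),
--     ('tennis plus', 'USA - Tennis Plus'), ('espn plus', 'USA - ESPN+'),
--     ('mlb', 'USA - MLB'), ('nba', 'USA - NBA'),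
--     ('nfl', 'USA - NFL'), ('nhl', 'USA - NHL'),
--     ('espn', 'USA - Sport'), ('tennis', 'USA - Sport'),
--     ('cnn', 'USA - News'),
--     ('hbo', 'USA - Premium'), ('showtime', 'USA - Premium'),
--     ('cinemax', 'USA - Premium'), ('starz', 'USA - Premium'),
--     ('mtv', 'USA - Entertainment'), ('vh1', 'USA - Entertainment'),
--     ('comedy central', 'USA - Entertainment'), ('tbs', 'USA - Entertainment'),
--     ('tnt', 'USA - Entertainment'),
--     ('disney', 'USA - Kids'), ('nickelodeon', 'USA - Kids'),
--     ('cartoon network', 'USA - Kids'), ('nick', 'USA - Kids'),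
-- ]
--
-- def determine_group(channel):
--     original_group = channel['group'].strip()
--     if original_group:
--         return original_group
--     name = channel['name'].lower()
--     hits = [i for i, (kw, _) in enumerate(_FLAT) if kw in name]
--     return _FLAT[min(hits)][1] if hits else 'USA'
-- ===== Notes on version B (the rewrite author's own statement) =====
-- stated objective: alternative
-- what changed: A's two-level nested if/elif cascade is replaced by one flat prioritized keyword table whose provably shadowed entries ('fox sports', 'fox news', 'msnbc', 'abc news', 'cbs news') are eliminated; B collects all matching table indices in a single comprehension and returns the group of the minimum-index hit.
import Mathlib
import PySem

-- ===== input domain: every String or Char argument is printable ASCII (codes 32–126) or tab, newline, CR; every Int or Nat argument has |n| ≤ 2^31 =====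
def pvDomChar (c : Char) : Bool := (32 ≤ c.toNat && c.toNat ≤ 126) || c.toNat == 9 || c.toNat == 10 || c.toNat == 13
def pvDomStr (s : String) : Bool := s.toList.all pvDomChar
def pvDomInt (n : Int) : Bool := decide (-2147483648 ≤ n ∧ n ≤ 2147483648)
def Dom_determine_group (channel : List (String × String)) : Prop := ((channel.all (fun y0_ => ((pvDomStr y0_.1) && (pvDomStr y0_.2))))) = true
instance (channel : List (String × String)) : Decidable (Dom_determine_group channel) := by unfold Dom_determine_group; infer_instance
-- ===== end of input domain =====

-- B flattens A's nested if/elif cascade into one prioritized flat keyword table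
-- (provably shadowed entries removed) and picks the minimum-index match; return-value
-- equivalence is proved below.
-- shared primitive: Python dict lookup channel[k] (first match; none = KeyError, excluded by Pre_)
def dgLookup? (channel : List (String × String)) (k : String) : Option String :=
  (channel.find? (fun p => p.1 == k)).map (·.2)

-- ===== PORT A =====
-- A's fall-through control flow is transliterated with lets: each `let` below is the
-- continuation "the rest of A's function from that block on".
def determine_group (channel : List (String × String)) : String :=
  match dgLookup? channel "group" with
  | none => ""  -- KeyError, outside Pre_
  | some g =>
    let original_group := PySem.Str.strip g
    if original_group ≠ "" then original_group
    else
      match dgLookup? channel "name" with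
      | none => ""  -- KeyError, outside Pre_
      | some nm =>
        let name := PySem.Str.lower nm
        let kids :=
          if ["disney", "nickelodeon", "cartoon network", "nick"].any (fun s => PySem.Str.isIn s name)
          then "USA - Kids" else "USA"
        let ent :=
          if ["mtv", "vh1", "comedy central", "tbs", "tnt"].any (fun s => PySem.Str.isIn s name)
          then "USA - Entertainment" else kids
        let premium :=
          if ["hbo", "showtime", "cinemax", "starz"].any (fun s => PySem.Str.isIn s name)
          then "USA - Premium" else ent
        let news :=
          if ["cnn", "fox news", "msnbc", "abc news", "cbs news"].any (fun s => PySem.Str.isIn s name)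
          then "USA - News" else premium
        let sports :=
          if ["espn", "fox sports", "tennis", "mlb", "nba", "nfl", "nhl"].any (fun s => PySem.Str.isIn s name) then
            if PySem.Str.isIn "tennis plus" name then "USA - Tennis Plus"
            else if PySem.Str.isIn "espn plus" name then "USA - ESPN+"
            else if PySem.Str.isIn "mlb" name then "USA - MLB"
            else if PySem.Str.isIn "nba" name then "USA - NBA"
            else if PySem.Str.isIn "nfl" name then "USA - NFL"
            else if PySem.Str.isIn "nhl" name then "USA - NHL"
            else "USA - Sport"
          else news
        if ["abc", "cbs", "nbc", "pbs", "fox"].any (fun s => PySem.Str.isIn s name) then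
          if PySem.Str.isIn "abc" name then "USA - ABC Network"
          else if PySem.Str.isIn "cbs" name then "USA - CBS Network"
          else if PySem.Str.isIn "nbc" name then "USA - NBC Network"
          else if PySem.Str.isIn "pbs" name then "USA - PBS Network"
          else if PySem.Str.isIn "fox" name then "USA - FOX Network"
          else sports  -- unreachable fall-through kept faithfully
        else sports

-- ===== PORT B =====
-- Source B's flat prioritized keyword table _FLAT
def dgFlat : List (String × String) :=
  [ ("abc", "USA - ABC Network"), ("cbs", "USA - CBS Network"),
    ("nbc", "USA - NBC Network"), ("pbs", "USA - PBS Network"),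
    ("fox", "USA - FOX Network"),
    ("tennis plus", "USA - Tennis Plus"), ("espn plus", "USA - ESPN+"),
    ("mlb", "USA - MLB"), ("nba", "USA - NBA"),
    ("nfl", "USA - NFL"), ("nhl", "USA - NHL"),
    ("espn", "USA - Sport"), ("tennis", "USA - Sport"),
    ("cnn", "USA - News"),
    ("hbo", "USA - Premium"), ("showtime", "USA - Premium"),
    ("cinemax", "USA - Premium"), ("starz", "USA - Premium"),
    ("mtv", "USA - Entertainment"), ("vh1", "USA - Entertainment"),
    ("comedy central", "USA - Entertainment"), ("tbs", "USA - Entertainment"),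
    ("tnt", "USA - Entertainment"),
    ("disney", "USA - Kids"), ("nickelodeon", "USA - Kids"),
    ("cartoon network", "USA - Kids"), ("nick", "USA - Kids") ]

def determine_group_alt (channel : List (String × String)) : String :=
  match dgLookup? channel "group" with
  | none => ""  -- KeyError, outside Pre_
  | some g =>
    let original_group := PySem.Str.strip g
    if original_group ≠ "" then original_group
    else
      match dgLookup? channel "name" with
      | none => ""  -- KeyError, outside Pre_
      | some nm =>
        let name := PySem.Str.lower nm
        -- hits = [i for i, (kw, _) in enumerate(_FLAT) if kw in name]
        let hits := ((PySem.List.enumerate dgFlat).filter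
          (fun p => PySem.Str.isIn p.2.1 name)).map (·.1)
        -- return _FLAT[min(hits)][1] if hits else 'USA'
        match PySem.List.min? hits (fun x => x) with
        | none => "USA"
        | some i =>
          match PySem.List.pyGet? dgFlat i with
          | some p => p.2
          | none => "USA"  -- unreachable: min(hits) is a valid index

-- ===== PRECONDITION & SPEC =====
-- Pre_ excludes exactly the inputs where Python A raises KeyError: no 'group' key, or
-- the stripped group is empty and there is no 'name' key.
def Pre_determine_group (channel : List (String × String)) : Prop :=
  (dgLookup? channel "group").isSome = true ∧
  (PySem.Str.strip ((dgLookup? channel "group").getD "") = "" →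
    (dgLookup? channel "name").isSome = true)
instance (channel : List (String × String)) : Decidable (Pre_determine_group channel) := by
  unfold Pre_determine_group; infer_instance

def pvWitness_determine_group : (List (String × String)) := [("group", ""), ("name", "Fox Sports 1")]

def Spec_determine_group (channel : List (String × String)) (out : String) : Prop := out = determine_group_alt channel
instance (channel : List (String × String)) (out : String) : Decidable (Spec_determine_group channel out) := by unfold Spec_determine_group; infer_instance

-- ===== CLAIM (what is proved, stated in full; the proofs are below) =====
def Claim_equal_determine_group : Prop := ∀ (channel : List (String × String)), Dom_determine_group channel → Pre_determine_group channel → Spec_determine_group channel (determine_group channel)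

-- ===== LEMMAS AND PROOFS =====

-- first-match index into a flat keyword table (proof-side characterisation of B's min-hit)
def dgFlatIdx (name : String) : List (String × String) → Option Nat
  | [] => none
  | (kw, _) :: rest =>
    if PySem.Str.isIn kw name then some 0 else (dgFlatIdx name rest).map (· + 1)

-- first-match scan of a flat keyword table (proof-side reference semantics)
def dgFlatScan (name : String) : List (String × String) → String
  | [] => "USA"
  | (kw, g) :: rest => if PySem.Str.isIn kw name then g else dgFlatScan name rest

theorem dg_cIn_true (a b s : List Char) (h : a <:+: b)
    (hb : PySem.Chars.isIn b s = true) : PySem.Chars.isIn a s = true := by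
  rw [PySem.Chars.isIn_iff_infix] at hb ⊢
  exact h.trans hb

theorem dg_cIn_false (a b s : List Char) (h : a <:+: b)
    (ha : PySem.Chars.isIn a s = false) : PySem.Chars.isIn b s = false := by
  by_contra hb
  rw [Bool.not_eq_false] at hb
  have := dg_cIn_true a b s h hb
  rw [ha] at this
  exact Bool.noConfusion this

theorem dg_foldl_min_self : ∀ (l : List Int) (a : Int), (∀ y ∈ l, a ≤ y) → l.foldl min a = a
  | [], _, _ => rfl
  | x :: t, a, h => by
    rw [List.foldl_cons, min_eq_left (h x (by simp))]
    exact dg_foldl_min_self t a (fun y hy => h y (by simp [hy]))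

-- B's min-over-hits equals the first-match index (shifted by the enumerate start)
theorem dg_min_eq (name : String) :
    ∀ (tbl : List (String × String)) (s : Int),
    PySem.List.min? (((PySem.List.enumerate tbl s).filter
        (fun p => PySem.Str.isIn p.2.1 name)).map (·.1)) (fun x => x)
      = (dgFlatIdx name tbl).map (fun k => s + (k : Int))
  | [], s => by simp [PySem.List.enumerate_nil, dgFlatIdx, PySem.List.min?]
  | (kw, g) :: rest, s => by
    rw [PySem.List.enumerate_cons]
    by_cases h : PySem.Str.isIn kw name = true
    · have hM : ∀ y ∈ ((PySem.List.enumerate rest (s + 1)).filter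
          (fun p => PySem.Str.isIn p.2.1 name)).map (·.1), s ≤ y := by
        intro y hy
        obtain ⟨p, hp, rfl⟩ := List.mem_map.1 hy
        obtain ⟨k, hk, rfl⟩ := (PySem.List.mem_enumerate_iff _ _ _).1 (List.mem_filter.1 hp).1
        simp only
        omega
      simp only [List.filter_cons, h, if_true, List.map_cons, dgFlatIdx, decide_true]
      rw [PySem.List.min?_id_cons, dg_foldl_min_self _ s hM]
      simp
    · simp only [List.filter_cons, h, decide_false, List.map_cons, dgFlatIdx,
        Bool.false_eq_true, if_false]
      rw [dg_min_eq name rest (s + 1)]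
      cases dgFlatIdx name rest with
      | none => simp
      | some k => simp; push_cast; ring
    decreasing_by simp

-- the first-match index selects the first-match element
theorem dg_get (name : String) :
    ∀ (tbl : List (String × String)) (k : Nat), dgFlatIdx name tbl = some k →
      ∃ p, tbl[k]? = some p ∧ p.2 = dgFlatScan name tbl
  | [], k, h => by simp [dgFlatIdx] at h
  | (kw, g) :: rest, k, h => by
    by_cases hm : PySem.Str.isIn kw name = true
    · simp only [dgFlatIdx, hm, if_true, Option.some.injEq] at h
      exact ⟨(kw, g), by simp [← h], by simp only [dgFlatScan, hm, if_true]⟩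
    · simp only [dgFlatIdx, hm, Bool.false_eq_true, if_false, Option.map_eq_some_iff] at h
      obtain ⟨k', hk', rfl⟩ := h
      obtain ⟨p, h1, h2⟩ := dg_get name rest k' hk'
      refine ⟨p, by simpa using h1, ?_⟩
      simp only [dgFlatScan]
      rw [if_neg hm]
      exact h2

theorem dg_none (name : String) :
    ∀ (tbl : List (String × String)), dgFlatIdx name tbl = none → dgFlatScan name tbl = "USA"
  | [], _ => rfl
  | (kw, g) :: rest, h => by
    by_cases hm : PySem.Str.isIn kw name = true
    · simp only [dgFlatIdx] at h
      rw [if_pos hm] at h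
      exact absurd h (Option.some_ne_none 0)
    · simp only [dgFlatIdx, hm, Bool.false_eq_true, if_false, Option.map_eq_none_iff] at h
      simp only [dgFlatScan]
      rw [if_neg hm]
      exact dg_none name rest h

-- B's inner computation (min over all hits, then index) is the first-match scan
theorem dg_alt_inner (name : String) :
    (match PySem.List.min? (((PySem.List.enumerate dgFlat).filter
        (fun p => PySem.Str.isIn p.2.1 name)).map (·.1)) (fun x => x) with
     | none => "USA"
     | some i =>
       match PySem.List.pyGet? dgFlat i with
       | some p => p.2
       | none => "USA") = dgFlatScan name dgFlat := by
  rw [dg_min_eq name dgFlat 0]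
  cases h : dgFlatIdx name dgFlat with
  | none => simp [dg_none name dgFlat h]
  | some k =>
    obtain ⟨p, hp, hs⟩ := dg_get name dgFlat k h
    simp [hp, hs]

-- for any name, A's chain of blocks equals the first-match scan of the flat table
theorem dg_name_eq (name : String) :
    (let kids :=
       if ["disney", "nickelodeon", "cartoon network", "nick"].any (fun s => PySem.Str.isIn s name)
       then "USA - Kids" else "USA"
     let ent :=
       if ["mtv", "vh1", "comedy central", "tbs", "tnt"].any (fun s => PySem.Str.isIn s name)
       then "USA - Entertainment" else kids
     let premium :=
       if ["hbo", "showtime", "cinemax", "starz"].any (fun s => PySem.Str.isIn s name)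
       then "USA - Premium" else ent
     let news :=
       if ["cnn", "fox news", "msnbc", "abc news", "cbs news"].any (fun s => PySem.Str.isIn s name)
       then "USA - News" else premium
     let sports :=
       if ["espn", "fox sports", "tennis", "mlb", "nba", "nfl", "nhl"].any (fun s => PySem.Str.isIn s name) then
         if PySem.Str.isIn "tennis plus" name then "USA - Tennis Plus"
         else if PySem.Str.isIn "espn plus" name then "USA - ESPN+"
         else if PySem.Str.isIn "mlb" name then "USA - MLB"
         else if PySem.Str.isIn "nba" name then "USA - NBA"
         else if PySem.Str.isIn "nfl" name then "USA - NFL"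
         else if PySem.Str.isIn "nhl" name then "USA - NHL"
         else "USA - Sport"
       else news
     if ["abc", "cbs", "nbc", "pbs", "fox"].any (fun s => PySem.Str.isIn s name) then
       if PySem.Str.isIn "abc" name then "USA - ABC Network"
       else if PySem.Str.isIn "cbs" name then "USA - CBS Network"
       else if PySem.Str.isIn "nbc" name then "USA - NBC Network"
       else if PySem.Str.isIn "pbs" name then "USA - PBS Network"
       else if PySem.Str.isIn "fox" name then "USA - FOX Network"
       else sports
     else sports) = dgFlatScan name dgFlat := by
  cases habc : PySem.Chars.isIn ['a', 'b', 'c'] name.toList with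
  | true => simp [dgFlatScan, dgFlat, habc]
  | false =>
    cases hcbs : PySem.Chars.isIn ['c', 'b', 's'] name.toList with
    | true => simp [dgFlatScan, dgFlat, habc, hcbs]
    | false =>
      cases hnbc : PySem.Chars.isIn ['n', 'b', 'c'] name.toList with
      | true => simp [dgFlatScan, dgFlat, habc, hcbs, hnbc]
      | false =>
        cases hpbs : PySem.Chars.isIn ['p', 'b', 's'] name.toList with
        | true => simp [dgFlatScan, dgFlat, habc, hcbs, hnbc, hpbs]
        | false =>
          cases hfox : PySem.Chars.isIn ['f', 'o', 'x'] name.toList with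
          | true => simp [dgFlatScan, dgFlat, habc, hcbs, hnbc, hpbs, hfox]
          | false =>
            have hfs : PySem.Chars.isIn ['f', 'o', 'x', ' ', 's', 'p', 'o', 'r', 't', 's'] name.toList = false := dg_cIn_false ['f', 'o', 'x'] ['f', 'o', 'x', ' ', 's', 'p', 'o', 'r', 't', 's'] name.toList (by decide) hfox
            have hfn : PySem.Chars.isIn ['f', 'o', 'x', ' ', 'n', 'e', 'w', 's'] name.toList = false := dg_cIn_false ['f', 'o', 'x'] ['f', 'o', 'x', ' ', 'n', 'e', 'w', 's'] name.toList (by decide) hfox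
            have hms : PySem.Chars.isIn ['m', 's', 'n', 'b', 'c'] name.toList = false := dg_cIn_false ['n', 'b', 'c'] ['m', 's', 'n', 'b', 'c'] name.toList (by decide) hnbc
            have han : PySem.Chars.isIn ['a', 'b', 'c', ' ', 'n', 'e', 'w', 's'] name.toList = false := dg_cIn_false ['a', 'b', 'c'] ['a', 'b', 'c', ' ', 'n', 'e', 'w', 's'] name.toList (by decide) habc
            have hcsn : PySem.Chars.isIn ['c', 'b', 's', ' ', 'n', 'e', 'w', 's'] name.toList = false := dg_cIn_false ['c', 'b', 's'] ['c', 'b', 's', ' ', 'n', 'e', 'w', 's'] name.toList (by decide) hcbs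
            cases htp : PySem.Chars.isIn ['t', 'e', 'n', 'n', 'i', 's', ' ', 'p', 'l', 'u', 's'] name.toList with
            | true =>
              have htnd : PySem.Chars.isIn ['t', 'e', 'n', 'n', 'i', 's'] name.toList = true := dg_cIn_true ['t', 'e', 'n', 'n', 'i', 's'] ['t', 'e', 'n', 'n', 'i', 's', ' ', 'p', 'l', 'u', 's'] name.toList (by decide) htp
              simp [dgFlatScan, dgFlat, habc, hcbs, hnbc, hpbs, hfox, hfs, hfn, hms, han, hcsn, htp, htnd]
            | false =>
              cases hep : PySem.Chars.isIn ['e', 's', 'p', 'n', ' ', 'p', 'l', 'u', 's'] name.toList with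
              | true =>
                have hesd : PySem.Chars.isIn ['e', 's', 'p', 'n'] name.toList = true := dg_cIn_true ['e', 's', 'p', 'n'] ['e', 's', 'p', 'n', ' ', 'p', 'l', 'u', 's'] name.toList (by decide) hep
                simp [dgFlatScan, dgFlat, habc, hcbs, hnbc, hpbs, hfox, hfs, hfn, hms, han, hcsn, htp, hep, hesd]
              | false =>
                cases hmlb : PySem.Chars.isIn ['m', 'l', 'b'] name.toList with
                | true => simp [dgFlatScan, dgFlat, habc, hcbs, hnbc, hpbs, hfox, hfs, hfn, hms, han, hcsn, htp, hep, hmlb]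
                | false =>
                  cases hnba : PySem.Chars.isIn ['n', 'b', 'a'] name.toList with
                  | true => simp [dgFlatScan, dgFlat, habc, hcbs, hnbc, hpbs, hfox, hfs, hfn, hms, han, hcsn, htp, hep, hmlb, hnba]
                  | false =>
                    cases hnfl : PySem.Chars.isIn ['n', 'f', 'l'] name.toList with
                    | true => simp [dgFlatScan, dgFlat, habc, hcbs, hnbc, hpbs, hfox, hfs, hfn, hms, han, hcsn, htp, hep, hmlb, hnba, hnfl]
                    | false =>
                      cases hnhl : PySem.Chars.isIn ['n', 'h', 'l'] name.toList with
                      | true => simp [dgFlatScan, dgFlat, habc, hcbs, hnbc, hpbs, hfox, hfs, hfn, hms, han, hcsn, htp, hep, hmlb, hnba, hnfl, hnhl]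
                      | false =>
                        cases hespn : PySem.Chars.isIn ['e', 's', 'p', 'n'] name.toList with
                        | true => simp [dgFlatScan, dgFlat, habc, hcbs, hnbc, hpbs, hfox, hfs, hfn, hms, han, hcsn, htp, hep, hmlb, hnba, hnfl, hnhl, hespn]
                        | false =>
                          cases htn : PySem.Chars.isIn ['t', 'e', 'n', 'n', 'i', 's'] name.toList with
                          | true => simp [dgFlatScan, dgFlat, habc, hcbs, hnbc, hpbs, hfox, hfs, hfn, hms, han, hcsn, htp, hep, hmlb, hnba, hnfl, hnhl, hespn, htn]
                          | false =>
                            cases hcnn : PySem.Chars.isIn ['c', 'n', 'n'] name.toList with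
                            | true => simp [dgFlatScan, dgFlat, habc, hcbs, hnbc, hpbs, hfox, hfs, hfn, hms, han, hcsn, htp, hep, hmlb, hnba, hnfl, hnhl, hespn, htn, hcnn]
                            | false =>
                              cases hhbo : PySem.Chars.isIn ['h', 'b', 'o'] name.toList with
                              | true => simp [dgFlatScan, dgFlat, habc, hcbs, hnbc, hpbs, hfox, hfs, hfn, hms, han, hcsn, htp, hep, hmlb, hnba, hnfl, hnhl, hespn, htn, hcnn, hhbo]
                              | false =>
                                cases hsho : PySem.Chars.isIn ['s', 'h', 'o', 'w', 't', 'i', 'm', 'e'] name.toList with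
                                | true => simp [dgFlatScan, dgFlat, habc, hcbs, hnbc, hpbs, hfox, hfs, hfn, hms, han, hcsn, htp, hep, hmlb, hnba, hnfl, hnhl, hespn, htn, hcnn, hhbo, hsho]
                                | false =>
                                  cases hcin : PySem.Chars.isIn ['c', 'i', 'n', 'e', 'm', 'a', 'x'] name.toList with
                                  | true => simp [dgFlatScan, dgFlat, habc, hcbs, hnbc, hpbs, hfox, hfs, hfn, hms, han, hcsn, htp, hep, hmlb, hnba, hnfl, hnhl, hespn, htn, hcnn, hhbo, hsho, hcin]
                                  | false =>
                                    cases hstz : PySem.Chars.isIn ['s', 't', 'a', 'r', 'z'] name.toList with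
                                    | true => simp [dgFlatScan, dgFlat, habc, hcbs, hnbc, hpbs, hfox, hfs, hfn, hms, han, hcsn, htp, hep, hmlb, hnba, hnfl, hnhl, hespn, htn, hcnn, hhbo, hsho, hcin, hstz]
                                    | false =>
                                      cases hmtv : PySem.Chars.isIn ['m', 't', 'v'] name.toList with
                                      | true => simp [dgFlatScan, dgFlat, habc, hcbs, hnbc, hpbs, hfox, hfs, hfn, hms, han, hcsn, htp, hep, hmlb, hnba, hnfl, hnhl, hespn, htn, hcnn, hhbo, hsho, hcin, hstz, hmtv]
                                      | false =>
                                        cases hvh1 : PySem.Chars.isIn ['v', 'h', '1'] name.toList with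
                                        | true => simp [dgFlatScan, dgFlat, habc, hcbs, hnbc, hpbs, hfox, hfs, hfn, hms, han, hcsn, htp, hep, hmlb, hnba, hnfl, hnhl, hespn, htn, hcnn, hhbo, hsho, hcin, hstz, hmtv, hvh1]
                                        | false =>
                                          cases hcc : PySem.Chars.isIn ['c', 'o', 'm', 'e', 'd', 'y', ' ', 'c', 'e', 'n', 't', 'r', 'a', 'l'] name.toList with
                                          | true => simp [dgFlatScan, dgFlat, habc, hcbs, hnbc, hpbs, hfox, hfs, hfn, hms, han, hcsn, htp, hep, hmlb, hnba, hnfl, hnhl, hespn, htn, hcnn, hhbo, hsho, hcin, hstz, hmtv, hvh1, hcc]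
                                          | false =>
                                            cases htbs : PySem.Chars.isIn ['t', 'b', 's'] name.toList with
                                            | true => simp [dgFlatScan, dgFlat, habc, hcbs, hnbc, hpbs, hfox, hfs, hfn, hms, han, hcsn, htp, hep, hmlb, hnba, hnfl, hnhl, hespn, htn, hcnn, hhbo, hsho, hcin, hstz, hmtv, hvh1, hcc, htbs]
                                            | false =>
                                              cases htnt : PySem.Chars.isIn ['t', 'n', 't'] name.toList with
                                              | true => simp [dgFlatScan, dgFlat, habc, hcbs, hnbc, hpbs, hfox, hfs, hfn, hms, han, hcsn, htp, hep, hmlb, hnba, hnfl, hnhl, hespn, htn, hcnn, hhbo, hsho, hcin, hstz, hmtv, hvh1, hcc, htbs, htnt]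
                                              | false =>
                                                cases hdis : PySem.Chars.isIn ['d', 'i', 's', 'n', 'e', 'y'] name.toList with
                                                | true => simp [dgFlatScan, dgFlat, habc, hcbs, hnbc, hpbs, hfox, hfs, hfn, hms, han, hcsn, htp, hep, hmlb, hnba, hnfl, hnhl, hespn, htn, hcnn, hhbo, hsho, hcin, hstz, hmtv, hvh1, hcc, htbs, htnt, hdis]
                                                | false =>
                                                  cases hnik : PySem.Chars.isIn ['n', 'i', 'c', 'k', 'e', 'l', 'o', 'd', 'e', 'o', 'n'] name.toList with
                                                  | true => simp [dgFlatScan, dgFlat, habc, hcbs, hnbc, hpbs, hfox, hfs, hfn, hms, han, hcsn, htp, hep, hmlb, hnba, hnfl, hnhl, hespn, htn, hcnn, hhbo, hsho, hcin, hstz, hmtv, hvh1, hcc, htbs, htnt, hdis, hnik]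
                                                  | false =>
                                                    cases hcw : PySem.Chars.isIn ['c', 'a', 'r', 't', 'o', 'o', 'n', ' ', 'n', 'e', 't', 'w', 'o', 'r', 'k'] name.toList with
                                                    | true => simp [dgFlatScan, dgFlat, habc, hcbs, hnbc, hpbs, hfox, hfs, hfn, hms, han, hcsn, htp, hep, hmlb, hnba, hnfl, hnhl, hespn, htn, hcnn, hhbo, hsho, hcin, hstz, hmtv, hvh1, hcc, htbs, htnt, hdis, hnik, hcw]
                                                    | false =>
                                                      cases hnck : PySem.Chars.isIn ['n', 'i', 'c', 'k'] name.toList with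
                                                      | true => simp [dgFlatScan, dgFlat, habc, hcbs, hnbc, hpbs, hfox, hfs, hfn, hms, han, hcsn, htp, hep, hmlb, hnba, hnfl, hnhl, hespn, htn, hcnn, hhbo, hsho, hcin, hstz, hmtv, hvh1, hcc, htbs, htnt, hdis, hnik, hcw, hnck]
                                                      | false =>
                                                        simp [dgFlatScan, dgFlat, habc, hcbs, hnbc, hpbs, hfox, hfs, hfn, hms, han, hcsn, htp, hep, hmlb, hnba, hnfl, hnhl, hespn, htn, hcnn, hhbo, hsho, hcin, hstz, hmtv, hvh1, hcc, htbs, htnt, hdis, hnik, hcw, hnck]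


-- ===== VERDICT (by name: the statement is the Claim_ definition above) =====
theorem determine_group_spec : Claim_equal_determine_group := by
  intro channel _ hpre
  unfold Spec_determine_group determine_group determine_group_alt
  obtain ⟨h1, h2⟩ := hpre
  cases hg : dgLookup? channel "group" with
  | none => simp [hg] at h1
  | some g =>
    simp only
    by_cases hs : PySem.Str.strip g ≠ ""
    · simp [hs]
    · simp only [not_not] at hs
      rw [hg] at h2
      have hn' := h2 (by simpa using hs)
      simp only [hs, ne_eq, not_true_eq_false, if_false]
      cases hn : dgLookup? channel "name" with
      | none => simp [hn] at hn'
      | some nm =>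
        simp only
        rw [dg_alt_inner (PySem.Str.lower nm)]
        exact dg_name_eq (PySem.Str.lower nm)
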